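-- pv_equiv track=rewrite | github.com/study-Algoringo/swjungle_PS | suhyun/[PGS] 138476.py | solution
-- ===== SOURCE A (Python) =====
-- from collections import Counter
--
-- def solution(k, tangerine):
--     answer = 0
--     result = k
--     data = list(zip(Counter(tangerine).keys(),Counter(tangerine).values()))
--     data.sort(key=lambda x : -x[1])
--
--     for k,v in data:
--         if result <= 0:
--             break
--
--         result-=v
--         answer+=1
--
--
--     return answer
-- ===== SOURCE B (Python) =====
-- from collections import Counter
--
-- def solution(k, tangerine):
--     # bucket counting over frequencies instead of a comparison sort
--     freq = Counter(Counter(tangerine).values())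
--     answer = 0
--     need = k
--     for v in range(len(tangerine), 0, -1):
--         c = freq.get(v, 0)
--         take = min(c, max(0, -(-need // v)))  # take up to c groups of size v
--         answer += take
--         need -= take * v
--     return answer
-- ===== Notes on version B (the rewrite author's own statement) =====
-- stated objective: alternative
-- what changed: B replaces A's comparison sort of the distinct (fruit, count) pairs by a Counter over the counts themselves (bucket counting) and a single arithmetic sweep over group sizes from len(tangerine) down to 1, taking ceil-division many groups of each size at once.
import Mathlib
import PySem

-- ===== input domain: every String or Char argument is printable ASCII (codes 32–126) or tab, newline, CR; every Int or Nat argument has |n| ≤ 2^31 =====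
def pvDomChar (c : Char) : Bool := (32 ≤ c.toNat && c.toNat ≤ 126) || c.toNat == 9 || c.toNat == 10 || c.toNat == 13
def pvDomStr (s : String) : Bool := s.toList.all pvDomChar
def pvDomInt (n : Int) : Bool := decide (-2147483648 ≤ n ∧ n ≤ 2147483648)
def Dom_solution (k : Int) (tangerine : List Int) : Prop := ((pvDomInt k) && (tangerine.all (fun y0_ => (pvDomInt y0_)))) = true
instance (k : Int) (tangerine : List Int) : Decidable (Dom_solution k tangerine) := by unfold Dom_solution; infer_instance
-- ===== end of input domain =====

-- B replaces A's comparison sort of the distinct counts by counting buckets over the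
-- frequencies and one high-to-low arithmetic sweep over group sizes (objective: alternative).

-- ===== PORT A =====
-- A's for-loop over the sorted (key, count) pairs, with its break
def solutionLoopA : Int → Int → List (Int × Int) → Int
  | _, answer, [] => answer
  | result, answer, (_, v) :: rest =>
      if result ≤ 0 then answer
      else solutionLoopA (result - v) (answer + 1) rest

def solution (k : Int) (tangerine : List Int) : Int :=
  let data := PySem.List.sorted ((PySem.Dict.counter tangerine).items) (fun x => -x.2) false
  solutionLoopA k 0 data

-- ===== PORT B =====
def solution_alt (k : Int) (tangerine : List Int) : Int :=
  let freq := PySem.Dict.counter ((PySem.Dict.counter tangerine).values)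
  let st := (PySem.List.pyRange (tangerine.length : Int) 0 (-1)).foldl
      (fun (st : Int × Int) v =>
        let c := freq.getD v 0
        let take := min c (max 0 (-(PySem.Int.floordiv (-st.2) v)))
        (st.1 + take, st.2 - take * v)) (0, k)
  st.1

-- ===== PRECONDITION & SPEC =====
def Spec_solution (k : Int) (tangerine : List Int) (out : Int) : Prop := out = solution_alt k tangerine
instance (k : Int) (tangerine : List Int) (out : Int) : Decidable (Spec_solution k tangerine out) := by unfold Spec_solution; infer_instance

-- ===== CLAIM (what is proved, stated in full; the proofs are below) =====
def Claim_equal_solution : Prop := ∀ (k : Int) (tangerine : List Int), Dom_solution k tangerine → Spec_solution k tangerine (solution k tangerine)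

-- ===== LEMMAS AND PROOFS =====

-- greedy one-at-a-time step on (answer, need), over the list of group sizes only
def stepV (st : Int × Int) (v : Int) : Int × Int :=
  if st.2 ≤ 0 then st else (st.1 + 1, st.2 - v)

lemma foldl_stepV_frozen (l : List Int) (a r : Int) (hr : r ≤ 0) :
    l.foldl stepV (a, r) = (a, r) := by
  induction l with
  | nil => rfl
  | cons v t ih => simpa [stepV, hr] using ih

lemma ceil_bracket (r v : Int) (hv : 0 < v) :
    (-(PySem.Int.floordiv (-r) v) - 1) * v < r ∧ r ≤ -(PySem.Int.floordiv (-r) v) * v :=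
  (PySem.Int.neg_floordiv_neg_eq_iff_of_pos hv).mp rfl

lemma foldl_stepV_replicate (c : Nat) (v a r : Int) (hv : 0 < v) :
    (List.replicate c v).foldl stepV (a, r)
      = (a + min (c : Int) (max 0 (-(PySem.Int.floordiv (-r) v))),
         r - min (c : Int) (max 0 (-(PySem.Int.floordiv (-r) v))) * v) := by
  induction c generalizing a r with
  | zero =>
      have h : min ((0:Nat) : Int) (max 0 (-(PySem.Int.floordiv (-r) v))) = 0 := by omega
      simp [h]

  | succ c ih =>
      set t := -(PySem.Int.floordiv (-r) v) with ht
      obtain ⟨hb1, hb2⟩ := ceil_bracket r v hv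
      by_cases hr : r ≤ 0
      · have htle : t ≤ 0 := by nlinarith
        have h : min (((c:Nat)+1 : Nat) : Int) (max 0 t) = 0 := by
          push_cast; omega
        rw [h]
        simp [List.replicate_succ, foldl_stepV_frozen _ _ _ hr]
      · have ht1 : 1 ≤ t := by nlinarith
        set t' := -(PySem.Int.floordiv (-(r - v)) v) with ht'
        obtain ⟨hb1', hb2'⟩ := ceil_bracket (r - v) v hv
        have htt : t' = t - 1 := by
          have h1 : t' < t := by nlinarith
          have h2 : t - 2 < t' := by nlinarith
          omega
        have hmin : min (((c:Nat)+1 : Nat) : Int) (max 0 t)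
            = min ((c:Nat) : Int) (max 0 t') + 1 := by
          push_cast; omega
        rw [List.replicate_succ, List.foldl_cons]
        have hstep : stepV (a, r) v = (a + 1, r - v) := by simp [stepV, hr]
        rw [hstep, ih (a+1) (r-v), hmin]
        rw [← ht']
        simp only [Prod.mk.injEq]
        exact ⟨by ring, by ring⟩

lemma perm_flatMap_replicate (l : List Int) :
    ∀ cs : List Int, l.Nodup → (∀ x ∈ cs, x ∈ l) →
      cs.Perm (l.flatMap (fun v => List.replicate (cs.count v) v)) := by
  induction l with
  | nil =>
      intro cs _ hmem
      have : cs = [] := by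
        cases cs with
        | nil => rfl
        | cons x t => exact absurd (hmem x (by simp)) (by simp)
      simp [this]
  | cons v l' ih =>
      intro cs hnd hmem
      obtain ⟨hvl', hnd'⟩ := List.nodup_cons.mp hnd
      have hsplit : (cs.filter (· == v) ++ cs.filter (fun x => !(x == v))).Perm cs :=
        List.filter_append_perm _ cs
      have hrep : cs.filter (· == v) = List.replicate (cs.count v) v := List.filter_beq (l := cs) (a := v)
      have htail : l'.flatMap (fun w => List.replicate (cs.count w) w)
          = l'.flatMap (fun w => List.replicate ((cs.filter (fun x => !(x == v))).count w) w) := by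
        apply List.flatMap_congr
        intro w hw
        have hwv : (fun x => !(x == v)) w = true := by
          simp only [Bool.not_eq_eq_eq_not, Bool.not_true, beq_eq_false_iff_ne]
          exact fun h => hvl' (h ▸ hw)
        rw [List.count_filter (p := fun x => !(x == v)) hwv]
      rw [List.flatMap_cons, htail]
      refine (hsplit.symm.trans ?_)
      rw [hrep]
      refine List.Perm.append (List.Perm.refl _) ?_
      apply ih
      · exact hnd'
      · intro x hx
        have hx' := List.mem_filter.mp hx
        have := hmem x hx'.1
        simp only [List.mem_cons] at this
        rcases this with h | h
        · exact absurd h (by simpa using hx'.2)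
        · exact h

lemma pairwise_flatMap_replicate (l : List Int) (m : Int → Nat)
    (hl : l.Pairwise (· > ·)) :
    (l.flatMap (fun v => List.replicate (m v) v)).Pairwise (· ≥ ·) := by
  induction l with
  | nil => simp
  | cons v l' ih =>
      obtain ⟨hv, hl'⟩ := List.pairwise_cons.mp hl
      rw [List.flatMap_cons, List.pairwise_append]
      refine ⟨List.pairwise_replicate.mpr (Or.inr le_rfl), ih hl', ?_⟩
      intro a ha b hb
      have ha' := List.eq_of_mem_replicate ha
      obtain ⟨w, hw, hbw⟩ := List.mem_flatMap.mp hb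
      have hb' := List.eq_of_mem_replicate hbw
      rw [ha', hb']
      exact le_of_lt (hv w hw)

lemma loopA_eq_foldl (ps : List (Int × Int)) (a r : Int) :
    solutionLoopA r a ps = ((ps.map (·.2)).foldl stepV (a, r)).1 := by
  induction ps generalizing a r with
  | nil => rfl
  | cons p t ih =>
      by_cases hr : r ≤ 0
      · simp [solutionLoopA, hr, foldl_stepV_frozen _ _ _ hr]
      · simp [solutionLoopA, stepV, hr, ih]

lemma foldB_eq (cs : List Int) (l : List Int) (hpos : ∀ v ∈ l, 0 < v) (st : Int × Int) :
    l.foldl (fun (st : Int × Int) v =>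
        let c := ((cs.count v : Int))
        let take := min c (max 0 (-(PySem.Int.floordiv (-st.2) v)))
        (st.1 + take, st.2 - take * v)) st
      = (l.flatMap (fun v => List.replicate (cs.count v) v)).foldl stepV st := by
  induction l generalizing st with
  | nil => rfl
  | cons v t ih =>
      obtain ⟨a, r⟩ := st
      rw [List.foldl_cons, List.flatMap_cons, List.foldl_append,
        foldl_stepV_replicate _ _ _ _ (hpos v (by simp))]
      exact ih (fun w hw => hpos w (by simp [hw])) _

lemma seq_eq (tangerine : List Int) :
    (PySem.List.sorted ((PySem.Dict.counter tangerine).items) (fun x => -x.2) false).map (·.2)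
      = (PySem.List.pyRange (tangerine.length : Int) 0 (-1)).flatMap
          (fun v => List.replicate (((PySem.Dict.counter tangerine).values).count v) v) := by
  have hvals : (PySem.Dict.counter tangerine).values
      = (PySem.Dict.counter tangerine).items.map (·.2) := rfl
  have hbound : ∀ x ∈ (PySem.Dict.counter tangerine).values,
      0 < x ∧ x ≤ (tangerine.length : Int) := by
    intro x hx
    rw [hvals, PySem.Dict.items_counter] at hx
    simp only [List.map_map, List.mem_map] at hx
    obtain ⟨key, hkey, hx⟩ := hx
    have hkmem : key ∈ tangerine := (PySem.Set.mem_ofList _ _).mp hkey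
    have h1 : 0 < tangerine.count key := List.count_pos_iff.mpr hkmem
    have h2 : tangerine.count key ≤ tangerine.length := List.count_le_length
    simp only [Function.comp] at hx
    rw [← hx]
    constructor
    · exact_mod_cast h1
    · exact_mod_cast h2
  have hlpw : (PySem.List.pyRange (tangerine.length : Int) 0 (-1)).Pairwise (· > ·) := by
    rw [PySem.List.pyRange_neg_one_eq_reverse, List.pairwise_reverse]
    simpa using PySem.List.pairwise_lt_pyRange_one (a := (0:Int) + 1)
      (b := (tangerine.length : Int) + 1)
  have hlnd : (PySem.List.pyRange (tangerine.length : Int) 0 (-1)).Nodup := hlpw.nodup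
  have hlmem : ∀ x ∈ (PySem.Dict.counter tangerine).values,
      x ∈ PySem.List.pyRange (tangerine.length : Int) 0 (-1) := by
    intro x hx
    rw [PySem.List.mem_pyRange_neg_one]
    exact ⟨(hbound x hx).1, (hbound x hx).2⟩
  have hperm : ((PySem.List.sorted ((PySem.Dict.counter tangerine).items)
        (fun x => -x.2) false).map (·.2)).Perm
      ((PySem.List.pyRange (tangerine.length : Int) 0 (-1)).flatMap
          (fun v => List.replicate (((PySem.Dict.counter tangerine).values).count v) v)) := by
    refine List.Perm.trans ?_
      (perm_flatMap_replicate _ _ hlnd hlmem)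
    rw [hvals]
    exact (PySem.List.sorted_perm _ _ _).map _
  have hpwA : ((PySem.List.sorted ((PySem.Dict.counter tangerine).items)
      (fun x => -x.2) false).map (·.2)).Pairwise (· ≥ ·) := by
    refine List.Pairwise.map _ ?_
      (PySem.List.sorted_pairwise ((PySem.Dict.counter tangerine).items) (fun x => -x.2))
    intro a b h
    simpa using h
  have hpwS := pairwise_flatMap_replicate
      (PySem.List.pyRange (tangerine.length : Int) 0 (-1))
      (fun v => ((PySem.Dict.counter tangerine).values).count v) hlpw
  exact List.Perm.eq_of_pairwise (fun a b _ _ h1 h2 => le_antisymm h2 h1) hpwA hpwS hperm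


-- ===== VERDICT (by name: the statement is the Claim_ definition above) =====
theorem solution_spec : Claim_equal_solution := by
  intro k tangerine _
  show solutionLoopA k 0 _ = _
  rw [loopA_eq_foldl]
  unfold solution_alt
  simp only [PySem.Dict.getD_counter]
  rw [foldB_eq _ _ (fun v hv => (PySem.List.mem_pyRange_neg_one.mp hv).1) (0, k), seq_eq]
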